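-- pv_equiv track=rewrite | github.com/stephen-wilson/Programming_Course_Projects | Lab 6/mines/lab.py | all_coordinates
-- ===== SOURCE A (Python) =====
-- def all_coordinates(dimensions):
--     """
--     Returns all possible coordinates of the board using recursion.
--     """
--     all_coords = []
--     out = []
--     # base case
--     if len(dimensions) == 1:
--         return [(i,) for i in range(dimensions[0])]
--     # recursive case, go from back to front
--     else:
--         all_coords = all_coordinates(dimensions[:-1])
--         for i in range(dimensions[-1]):
--             for coord in all_coords:
--                 out.append(coord + (i,))
--     return out
-- ===== SOURCE B (Python) =====
-- def all_coordinates(dimensions):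
--     """
--     Returns all possible coordinates of the board as an iterative
--     left-fold over the dimensions (no recursion).
--     """
--     result = [()]
--     for d in dimensions:
--         result = [coord + (i,) for i in range(d) for coord in result]
--     return result
-- ===== Notes on version B (the rewrite author's own statement) =====
-- stated objective: simpler
-- what changed: Replaces the recursion on dimensions[:-1] with an iterative left-fold that grows a list of partial coordinate tuples, one dimension at a time.
import Mathlib
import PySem

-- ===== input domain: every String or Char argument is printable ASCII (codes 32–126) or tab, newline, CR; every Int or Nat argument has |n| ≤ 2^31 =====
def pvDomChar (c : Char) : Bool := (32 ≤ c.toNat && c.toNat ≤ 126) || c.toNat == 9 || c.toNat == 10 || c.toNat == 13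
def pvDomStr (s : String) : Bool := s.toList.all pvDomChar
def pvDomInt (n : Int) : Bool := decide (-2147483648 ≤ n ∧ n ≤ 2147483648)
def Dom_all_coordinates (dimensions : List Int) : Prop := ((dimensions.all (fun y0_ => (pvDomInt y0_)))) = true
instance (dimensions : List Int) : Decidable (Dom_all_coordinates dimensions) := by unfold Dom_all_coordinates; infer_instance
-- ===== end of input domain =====

-- B replaces A's recursion on dimensions[:-1] with an iterative left-fold over the
-- dimensions (objective: simpler). On [] A recurses forever (RecursionError); B returns [[]].

-- ===== PORT A =====
-- Literal port of A's recursion; the `dimensions = []` guard only makes the function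
-- total (the Python recurses forever there; excluded by Pre_).
def all_coordinates (dimensions : List Int) : List (List Int) :=
  if dimensions.length = 1 then
    (PySem.List.pyRange 0 ((PySem.List.pyGet? dimensions 0).getD 0) 1).map (fun i => [i])
  else if h : dimensions = [] then
    []
  else
    let all_coords := all_coordinates dimensions.dropLast
    (PySem.List.pyRange 0 ((PySem.List.pyGet? dimensions (-1)).getD 0) 1).foldl
      (fun out i => out ++ all_coords.map (fun coord => coord ++ [i])) []
termination_by dimensions.length
decreasing_by have := List.length_pos_of_ne_nil h; simp [List.length_dropLast]; omega

-- ===== PORT B =====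
-- the comprehension [coord + (i,) for i in range(d) for coord in result]
def pyStep (result : List (List Int)) (d : Int) : List (List Int) :=
  (PySem.List.pyRange 0 d 1).foldl
    (fun acc i => acc ++ result.map (fun coord => coord ++ [i])) []

def all_coordinates_alt (dimensions : List Int) : List (List Int) :=
  dimensions.foldl pyStep [[]]

-- ===== PRECONDITION & SPEC =====
-- Pre_ excludes only the empty list, on which Python A raises RecursionError.
def Pre_all_coordinates (dimensions : List Int) : Prop := dimensions ≠ []
instance (dimensions : List Int) : Decidable (Pre_all_coordinates dimensions) := by
  unfold Pre_all_coordinates; infer_instance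

def pvWitness_all_coordinates : List Int := [2, 3]

def Spec_all_coordinates (dimensions : List Int) (out : List (List Int)) : Prop :=
  out = all_coordinates_alt dimensions
instance (dimensions : List Int) (out : List (List Int)) : Decidable (Spec_all_coordinates dimensions out) := by
  unfold Spec_all_coordinates; infer_instance

-- ===== CLAIM (what is proved, stated in full; the proofs are below) =====
def Claim_equal_all_coordinates : Prop := ∀ (dimensions : List Int), Dom_all_coordinates dimensions → Pre_all_coordinates dimensions → Spec_all_coordinates dimensions (all_coordinates dimensions)

-- ===== LEMMAS AND PROOFS =====

-- A on a nonempty list equals the fold of pyStep from [[]].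
theorem all_coordinates_eq_foldl :
    ∀ (dimensions : List Int), dimensions ≠ [] →
      all_coordinates dimensions = dimensions.foldl pyStep [[]] := by
  intro dims
  induction dims using List.reverseRecOn with
  | nil => intro h; exact absurd rfl h
  | append_singleton ds d ih =>
    intro _
    rcases List.eq_nil_or_concat ds with hds | ⟨es, e, rfl⟩
    · subst hds
      rw [all_coordinates.eq_def]
      simp [pyStep]
      rw [PySem.List.pyRange_one]
      induction (d - 0).toNat with
      | zero => simp
      | succ n ihn =>
        rw [List.range_succ]
        simp_all
    · simp only [List.concat_eq_append] at ih ⊢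
      rw [all_coordinates.eq_def]
      have hlen : ((es ++ [e]) ++ [d]).length ≠ 1 := by simp
      rw [if_neg hlen, dif_neg (by simp)]
      rw [List.dropLast_concat, ih (by simp), List.foldl_append]
      simp [pyStep, PySem.List.pyGet?_neg_one, List.getLast?_append]

-- ===== VERDICT (by name: the statement is the Claim_ definition above) =====
theorem all_coordinates_spec : Claim_equal_all_coordinates := by
  intro dims _ hpre
  unfold Spec_all_coordinates all_coordinates_alt
  exact all_coordinates_eq_foldl dims hpre
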